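-- pv_equiv track=rewrite | github.com/lorserker/ben | scripts/data/gib/training_set.py | print_hand
-- ===== SOURCE A (Python) =====
-- suits = ['S', 'H', 'D', 'C']
--
-- def print_hand(hand):
--     formatted_hand = {suit: [] for suit in suits}
--
--     for card in hand:
--         suit = card[-1]
--         formatted_hand[suit].append(card[:-1])
--
--     printed_hand = ""
--     for suit in formatted_hand:
--         printed_hand += "".join(formatted_hand[suit]) + "."
--
--     return printed_hand[:-1]  # Remove the trailing period at the end
-- ===== SOURCE B (Python) =====
-- suits = ['S', 'H', 'D', 'C']
--
-- def print_hand(hand):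
--     # decorate each card with its suit's index once, then one filtering pass per suit, joined with '.'
--     keyed = [(suits.index(card[-1]), card[:-1]) for card in hand]
--     return '.'.join(''.join(rank for k, rank in keyed if k == i) for i in range(len(suits)))
-- ===== Notes on version B (the rewrite author's own statement) =====
-- stated objective: idiomatic
-- what changed: Replaced A's dict-of-lists bucketing pass plus dict-iteration concatenation with a trailing-period trim by decorating each card once with its suit index (suits.index) and then '.'-joining one filtering pass per suit over the decorated list.
import Mathlib
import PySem

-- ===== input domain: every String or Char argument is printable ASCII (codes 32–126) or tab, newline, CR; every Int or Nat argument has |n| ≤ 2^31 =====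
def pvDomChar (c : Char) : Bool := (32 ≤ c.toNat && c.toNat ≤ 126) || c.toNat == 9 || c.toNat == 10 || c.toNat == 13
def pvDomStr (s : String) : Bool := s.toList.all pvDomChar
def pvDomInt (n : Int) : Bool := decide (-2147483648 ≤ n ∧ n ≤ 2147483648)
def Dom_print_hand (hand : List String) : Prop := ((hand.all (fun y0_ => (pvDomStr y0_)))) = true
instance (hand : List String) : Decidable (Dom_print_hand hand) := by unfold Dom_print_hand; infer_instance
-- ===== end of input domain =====

-- B replaces A's dict bucketing + dict-iteration concatenation (and trailing-period trim) by a suit-index decoration pass and a '.'-join of one filtering pass per suit (idiomatic).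
-- ===== PORT A =====
def pvSuits : List Char := ['S', 'H', 'D', 'C']

def print_hand (hand : List String) : String :=
  -- formatted_hand = {suit: [] for suit in suits}
  let d0 : PySem.Dict Char (List String) := pvSuits.foldl (fun d s => d.insert s []) PySem.Dict.empty
  -- for card in hand: suit = card[-1]; formatted_hand[suit].append(card[:-1])
  -- card[-1] raises IndexError on "" and formatted_hand[suit] raises KeyError on an unknown suit: both excluded by Pre_
  let fh := hand.foldl (fun d card =>
    let suit := (PySem.Str.pyGet? card (-1)).getD ' '
    d.modify suit [] (fun l => l ++ [PySem.Str.slice card none (some (-1))])) d0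
  -- printed_hand = ""; for suit in formatted_hand: printed_hand += "".join(formatted_hand[suit]) + "."
  let printed : List Char := fh.keys.foldl (fun acc suit =>
    acc ++ (PySem.Str.join "" (fh.getD suit [])).toList ++ ['.']) []
  -- return printed_hand[:-1]
  String.ofList (PySem.List.slice printed none (some (-1)))

-- ===== PORT B =====
def print_hand_alt (hand : List String) : String :=
  -- keyed = [(suits.index(card[-1]), card[:-1]) for card in hand]
  -- card[-1] raises IndexError on "" and suits.index raises ValueError on an unknown suit: both excluded by Pre_
  let keyed : List (Int × String) := hand.map (fun card =>
    (((PySem.List.index? pvSuits ((PySem.Str.pyGet? card (-1)).getD ' ')).getD 0 : Nat),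
     PySem.Str.slice card none (some (-1))))
  PySem.Str.join "." ((PySem.List.pyRange 0 (pvSuits.length : Int) 1).map (fun i =>
    PySem.Str.join "" ((keyed.filter (fun p => p.1 == i)).map (fun p => p.2))))

-- ===== PRECONDITION & SPEC =====
-- Pre_ excludes hands with an empty-string card (both raise IndexError) or a card whose
-- last character is not one of S/H/D/C (A raises KeyError on the dict lookup, B ValueError on suits.index).
def Pre_print_hand (hand : List String) : Prop :=
  (hand.all (fun card => pvSuits.any (fun s => PySem.Str.pyGet? card (-1) == some s))) = true
instance (hand : List String) : Decidable (Pre_print_hand hand) := by unfold Pre_print_hand; infer_instance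
def pvWitness_print_hand : List String := ["AS", "KS", "2H", "TD", "3C"]

def Spec_print_hand (hand : List String) (out : String) : Prop := out = print_hand_alt hand
instance (hand : List String) (out : String) : Decidable (Spec_print_hand hand out) := by unfold Spec_print_hand; infer_instance

-- ===== CLAIM (what is proved, stated in full; the proofs are below) =====
def Claim_equal_print_hand : Prop := ∀ (hand : List String), Dom_print_hand hand → Pre_print_hand hand → Spec_print_hand hand (print_hand hand)

-- ===== LEMMAS AND PROOFS =====

-- proof-only helpers: the per-card key and rank A computes
def pvKey (card : String) : Char := (PySem.Str.pyGet? card (-1)).getD ' '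
def pvRank (card : String) : String := PySem.Str.slice card none (some (-1))

theorem pv_keys (hand : List String) :
    ∀ d : PySem.Dict Char (List String), (∀ c ∈ hand, pvKey c ∈ d.keys) →
    (hand.foldl (fun d card => d.modify (pvKey card) [] (fun l => l ++ [pvRank card])) d).keys = d.keys := by
  induction hand with
  | nil => intro d _; rfl
  | cons c t ih =>
    intro d h
    have hc : d.contains (pvKey c) = true := by
      rw [PySem.Dict.contains_iff_mem_keys]; exact h c (by simp)
    have hk : (d.modify (pvKey c) [] (fun l => l ++ [pvRank c])).keys = d.keys := by
      rw [PySem.Dict.keys_modify, PySem.Dict.keys_insert_of_contains _ _ hc]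
    simp only [List.foldl_cons]
    rw [ih _ (by intro x hx; rw [hk]; exact h x (by simp [hx])), hk]

theorem pv_bucket (hand : List String) :
    ∀ (d : PySem.Dict Char (List String)) (suit : Char),
    (hand.foldl (fun d card => d.modify (pvKey card) [] (fun l => l ++ [pvRank card])) d).getD suit []
      = d.getD suit [] ++ (hand.filter (fun c => pvKey c == suit)).map pvRank := by
  induction hand with
  | nil => intro d suit; simp
  | cons c t ih =>
    intro d suit
    simp only [List.foldl_cons]
    rw [ih]
    rw [PySem.Dict.getD_modify]
    by_cases h : suit = pvKey c
    · subst h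
      rw [if_pos rfl, List.filter_cons, if_pos (beq_self_eq_true (pvKey c)),
        List.map_cons, List.append_assoc, List.singleton_append]
    · have hb : (pvKey c == suit) = false := beq_eq_false_iff_ne.mpr (fun e => h e.symm)
      rw [if_neg h, List.filter_cons, if_neg (by rw [hb]; exact Bool.false_ne_true)]

theorem pv_dropLast (a b c d : List Char) :
    (((([] ++ a ++ ['.']) ++ b ++ ['.']) ++ c ++ ['.']) ++ d ++ ['.']).dropLast
      = a ++ '.' :: (b ++ '.' :: (c ++ '.' :: d)) := by
  rw [show (((([] ++ a ++ ['.']) ++ b ++ ['.']) ++ c ++ ['.']) ++ d ++ ['.'])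
      = (a ++ '.' :: (b ++ '.' :: (c ++ '.' :: d))) ++ ['.'] by simp [List.append_assoc]]
  exact List.dropLast_concat ..

theorem pv_join4 (a b c d : String) :
    PySem.Str.join "." [a, b, c, d]
      = String.ofList (a.toList ++ '.' :: (b.toList ++ '.' :: (c.toList ++ '.' :: d.toList))) := by
  rw [show PySem.Str.join "." [a, b, c, d]
      = String.ofList (PySem.Chars.join ".".toList ([a, b, c, d].map String.toList)) from rfl]
  simp [PySem.Chars.join_cons_cons, PySem.Chars.join_singleton]

theorem pv_part (hand : List String)
    (hPre' : ∀ c ∈ hand, ∃ s ∈ pvSuits, PySem.Str.pyGet? c (-1) = some s)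
    (i : Int) (sc : Char)
    (hcs : ∀ s ∈ pvSuits, ((((PySem.List.index? pvSuits s).getD 0 : Nat) : Int) == i) = (s == sc)) :
    ((hand.map (fun card => (((PySem.List.index? pvSuits ((PySem.Str.pyGet? card (-1)).getD ' ')).getD 0 : Int),
        PySem.Str.slice card none (some (-1))))).filter (fun p => p.1 == i)).map (fun p => p.2)
      = (hand.filter (fun c => PySem.Str.pyGet? c (-1) == some sc)).map
          (fun card => PySem.Str.slice card none (some (-1))) := by
  rw [List.filter_map, List.map_map]
  have hf : hand.filter ((fun (p : Int × String) => p.1 == i) ∘ (fun card =>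
        (((PySem.List.index? pvSuits ((PySem.Str.pyGet? card (-1)).getD ' ')).getD 0 : Int),
         PySem.Str.slice card none (some (-1)))))
      = hand.filter (fun c => PySem.Str.pyGet? c (-1) == some sc) := by
    apply List.filter_congr
    intro c hc
    obtain ⟨s, hs, he⟩ := hPre' c hc
    simp only [Function.comp, he, Option.getD_some]
    rw [hcs s hs]
    rfl
  rw [hf]
  rfl

-- ===== VERDICT (by name: the statements are the Claim_ definitions above) =====
set_option maxRecDepth 8192 in
theorem print_hand_spec : Claim_equal_print_hand := by
  intro hand _ hPre
  have hPre' : ∀ c ∈ hand, ∃ s ∈ pvSuits, PySem.Str.pyGet? c (-1) = some s := by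
    intro c hc
    rcases List.any_eq_true.mp (List.all_eq_true.mp hPre c hc) with ⟨s, hs, he⟩
    exact ⟨s, hs, eq_of_beq he⟩
  show print_hand hand = print_hand_alt hand
  simp only [print_hand, print_hand_alt]
  rw [show (fun (d : PySem.Dict Char (List String)) (card : String) =>
        d.modify ((PySem.Str.pyGet? card (-1)).getD ' ') [] fun l => l ++ [PySem.Str.slice card none (some (-1))])
      = (fun d card => d.modify (pvKey card) [] fun l => l ++ [pvRank card]) from rfl]
  set d0 : PySem.Dict Char (List String) := pvSuits.foldl (fun d s => d.insert s []) PySem.Dict.empty with hd0def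
  have hd0 : d0 = PySem.Dict.mk [('S',[]),('H',[]),('D',[]),('C',[])] := rfl
  set fh := hand.foldl (fun d card => d.modify (pvKey card) [] (fun l => l ++ [pvRank card])) d0 with hfh
  have hkeys : fh.keys = pvSuits := by
    rw [hfh, pv_keys hand d0]
    · rw [hd0]; rfl
    · intro c hc
      obtain ⟨s, hs, he⟩ := hPre' c hc
      have he' : PySem.List.pyGet? c.toList (-1) = some s := by simpa using he
      have : pvKey c = s := by simp [pvKey, he']
      rw [this, hd0]
      simpa [pvSuits] using hs
  have hbucket : ∀ suit : Char, fh.getD suit []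
      = (hand.filter (fun c => PySem.Str.pyGet? c (-1) == some suit)).map pvRank := by
    intro suit
    rw [hfh, pv_bucket hand d0 suit, hd0]
    have hz : (PySem.Dict.mk [('S',([]:List String)),('H',[]),('D',[]),('C',[])]).getD suit [] = [] := by
      simp [PySem.Dict.getD_eq_get?_getD, PySem.Dict.get?_mk_cons]
      split_ifs <;> rfl
    rw [hz, List.nil_append]
    congr 1
    apply List.filter_congr
    intro c hc
    obtain ⟨s, _, he⟩ := hPre' c hc
    have he' : PySem.List.pyGet? c.toList (-1) = some s := by simpa using he
    simp [pvKey, he']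
  rw [hkeys]
  rw [show PySem.List.pyRange 0 (pvSuits.length : Int) 1 = [0, 1, 2, 3] from by decide]
  simp only [List.map_cons, List.map_nil]
  rw [pv_part hand hPre' 0 'S' (by intro s hs; fin_cases hs <;> rfl), pv_part hand hPre' 1 'H' (by intro s hs; fin_cases hs <;> rfl),
    pv_part hand hPre' 2 'D' (by intro s hs; fin_cases hs <;> rfl), pv_part hand hPre' 3 'C' (by intro s hs; fin_cases hs <;> rfl)]
  simp only [pvSuits, List.foldl_cons, List.foldl_nil, hbucket]
  rw [PySem.List.slice_to_neg_one, pv_join4, pv_dropLast,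
    show pvRank = (fun card => PySem.Str.slice card none (some (-1))) from rfl]
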